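-- pv_equiv track=rewrite | github.com/KLGR123/EvolAgent | src/utils/html_logger.py | _extract_latest_plan
-- ===== SOURCE A (Python) =====
-- def _extract_latest_plan(history: str) -> str:
--     """Extract the latest plan from the history string."""
--     if not history.strip():
--         return ""
--
--     try:
--         # Split history by dictionary blocks (each starts with '{' and ends with '}')
--         blocks = []
--         current_block = []
--         brace_count = 0
--
--         for line in history.split('\n'):
--             line = line.strip()
--             if line == '{':
--                 if current_block:
--                     blocks.append('\n'.join(current_block))
--                 current_block = [line]
--                 brace_count = 1
--             elif line == '}' and brace_count > 0:
--                 current_block.append(line)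
--                 blocks.append('\n'.join(current_block))
--                 current_block = []
--                 brace_count = 0
--             elif brace_count > 0:
--                 current_block.append(line)
--
--         # Find the last block that contains a plan from planner role
--         for block in reversed(blocks):
--             if '"role": \'planner\'' in block and '"plan":' in block:
--                 # Extract plan content
--                 lines = block.split('\n')
--                 for line in lines:
--                     if '"plan":' in line:
--                         # Extract the plan content between quotes
--                         plan_part = line.split('"plan":', 1)[1].strip()
--                         if plan_part.endswith(','):
--                             plan_part = plan_part[:-1]
--                         # Remove outer quotes and unescape
--                         if plan_part.startswith("'") and plan_part.endswith("'"):
--                             plan_content = plan_part[1:-1]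
--                         elif plan_part.startswith('"') and plan_part.endswith('"'):
--                             plan_content = plan_part[1:-1]
--                         else:
--                             plan_content = plan_part
--                         return plan_content.replace("\\n", "\n").replace("\\'", "'").replace('\\"', '"')
--
--         return "No plan found in history"
--
--     except Exception as e:
--         # If parsing fails, return a safe fallback
--         return f"Error parsing plan history: {str(e)}"
-- ===== SOURCE B (Python) =====
-- def _scan_block(block, latest):
--     """If block is a planner block with a plan line, return its extracted plan; else keep latest."""
--     if '"role": \'planner\'' in block and '"plan":' in block:
--         for line in block.split('\n'):
--             if '"plan":' in line:
--                 plan_part = line.split('"plan":', 1)[1].strip()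
--                 if plan_part.endswith(','):
--                     plan_part = plan_part[:-1]
--                 if plan_part.startswith("'") and plan_part.endswith("'"):
--                     plan_part = plan_part[1:-1]
--                 elif plan_part.startswith('"') and plan_part.endswith('"'):
--                     plan_part = plan_part[1:-1]
--                 return plan_part.replace("\\n", "\n").replace("\\'", "'").replace('\\"', '"')
--     return latest
--
--
-- def _extract_latest_plan(history: str) -> str:
--     """Single forward pass: scan each block as soon as it is flushed, overwriting latest."""
--     if not history.strip():
--         return ""
--     latest = "No plan found in history"
--     current_block = []
--     in_block = False
--     for line in history.split('\n'):
--         line = line.strip()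
--         if line == '{':
--             if current_block:
--                 latest = _scan_block('\n'.join(current_block), latest)
--             current_block = [line]
--             in_block = True
--         elif line == '}' and in_block:
--             current_block.append(line)
--             latest = _scan_block('\n'.join(current_block), latest)
--             current_block = []
--             in_block = False
--         elif in_block:
--             current_block.append(line)
--     return latest
-- ===== Notes on version B (the rewrite author's own statement) =====
-- stated objective: alternative
-- what changed: B eliminates A's intermediate blocks list and its reverse scan: one forward pass over stripped lines scans each block the moment it is flushed (on '}' or on a new '{') and overwrites a latest-plan accumulator initialized to the not-found sentinel, so the last matching block naturally wins.
import Mathlib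
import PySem

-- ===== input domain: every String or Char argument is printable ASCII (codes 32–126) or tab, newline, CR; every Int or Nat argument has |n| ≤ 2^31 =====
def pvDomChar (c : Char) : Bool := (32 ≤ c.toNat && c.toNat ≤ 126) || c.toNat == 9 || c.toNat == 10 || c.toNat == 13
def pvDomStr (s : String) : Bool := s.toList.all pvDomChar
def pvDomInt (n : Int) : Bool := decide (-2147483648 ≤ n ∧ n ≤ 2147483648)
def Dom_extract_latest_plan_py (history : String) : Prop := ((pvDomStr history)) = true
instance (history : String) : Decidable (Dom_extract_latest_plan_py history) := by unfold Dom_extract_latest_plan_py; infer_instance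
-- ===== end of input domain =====

-- B replaces A's two phases (collect all blocks, then scan them in reverse for the last
-- planner plan) by one forward pass that scans each block as it is flushed, overwriting a
-- latest-plan accumulator; same cost, no intermediate blocks list (objective: alternative).


-- shared literal code of both Pythons: the markers, the per-line plan extraction and the
-- inner 'for line in lines: if '"plan":' in line: return …' loop (identical text in Source A and Source B)
def pvBlockCond (b : String) : Bool :=
  PySem.Str.isIn "\"role\": 'planner'" b && PySem.Str.isIn "\"plan\":" b

def pvExtractLine (line : String) : String :=
  let parts := (PySem.Str.splitMax? line "\"plan\":" 1).getD []
  let plan_part := PySem.Str.strip (parts.getD 1 "")   -- [1] exists: the marker is in the line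
  let plan_part := if PySem.Str.endswith plan_part "," then PySem.Str.slice plan_part none (some (-1)) else plan_part
  let plan_content :=
    if PySem.Str.startswith plan_part "'" && PySem.Str.endswith plan_part "'" then
      PySem.Str.slice plan_part (some 1) (some (-1))
    else if PySem.Str.startswith plan_part "\"" && PySem.Str.endswith plan_part "\"" then
      PySem.Str.slice plan_part (some 1) (some (-1))
    else plan_part
  PySem.Str.replace (PySem.Str.replace (PySem.Str.replace plan_content "\\n" "\n") "\\'" "'") "\\\"" "\""

def pvInnerScan : List String → Option String
  | [] => none
  | l :: rest => if PySem.Str.isIn "\"plan\":" l then some (pvExtractLine l) else pvInnerScan rest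

-- ===== PORT A =====
-- phase 1: collect blocks; state = (blocks, current_block, brace_count)
def pvStepA (st : List String × List String × Nat) (l : String) : List String × List String × Nat :=
  let (blocks, current, brace) := st
  let line := PySem.Str.strip l
  if line = "{" then
    (if current ≠ [] then blocks ++ [PySem.Str.join "\n" current] else blocks, [line], 1)
  else if line = "}" ∧ brace > 0 then
    (blocks ++ [PySem.Str.join "\n" (current ++ [line])], [], 0)
  else if brace > 0 then (blocks, current ++ [line], brace)
  else st

-- phase 2: 'for block in reversed(blocks)', first planner block wins; an inner loop that
-- finds no plan line falls through to the next (earlier) block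
def pvScanRevA : List String → String
  | [] => "No plan found in history"
  | b :: rest =>
    if pvBlockCond b then
      match pvInnerScan ((PySem.Str.split? b "\n").getD []) with
      | some r => r
      | none => pvScanRevA rest
    else pvScanRevA rest

def extract_latest_plan_py (history : String) : String :=
  if PySem.Str.strip history = "" then "" else
    let st := ((PySem.Str.split? history "\n").getD []).foldl pvStepA ([], [], 0)
    pvScanRevA st.1.reverse

-- ===== PORT B =====
-- _scan_block: test the flushed block, overwrite latest on a match
def pvScanBlockB (block latest : String) : String :=
  if pvBlockCond block then
    match pvInnerScan ((PySem.Str.split? block "\n").getD []) with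
    | some r => r
    | none => latest
  else latest

-- one forward pass; state = (latest, current_block, in_block)
def pvStepB (st : String × List String × Bool) (l : String) : String × List String × Bool :=
  let (latest, current, inBlock) := st
  let line := PySem.Str.strip l
  if line = "{" then
    (if current ≠ [] then pvScanBlockB (PySem.Str.join "\n" current) latest else latest, [line], true)
  else if line = "}" ∧ inBlock = true then
    (pvScanBlockB (PySem.Str.join "\n" (current ++ [line])) latest, [], false)
  else if inBlock = true then (latest, current ++ [line], inBlock)
  else st

def extract_latest_plan_py_alt (history : String) : String :=
  if PySem.Str.strip history = "" then "" else
    (((PySem.Str.split? history "\n").getD []).foldl pvStepB ("No plan found in history", [], false)).1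

-- ===== PRECONDITION & SPEC =====
def Spec_extract_latest_plan_py (history : String) (out : String) : Prop := out = extract_latest_plan_py_alt history
instance (history : String) (out : String) : Decidable (Spec_extract_latest_plan_py history out) := by unfold Spec_extract_latest_plan_py; infer_instance

-- ===== CLAIM (what is proved, stated in full; the proofs are below) =====
def Claim_equal_extract_latest_plan_py : Prop := ∀ (history : String), Dom_extract_latest_plan_py history → Spec_extract_latest_plan_py history (extract_latest_plan_py history)

-- ===== LEMMAS AND PROOFS =====

-- consuming one block on A's reversed scan is exactly one _scan_block update on B's side
theorem pvScanRevA_cons (b : String) (t : List String) :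
    pvScanRevA (b :: t) = pvScanBlockB b (pvScanRevA t) := by
  simp [pvScanRevA, pvScanBlockB]

-- loop invariant: B's state mirrors A's state through (blocks ↦ pvScanRevA blocks.reverse, brace ↦ brace > 0)
theorem pvLoop_inv (ls : List String) : ∀ (bs cur : List String) (n : Nat),
    ls.foldl pvStepB (pvScanRevA bs.reverse, cur, decide (n > 0))
      = (fun st : List String × List String × Nat =>
          (pvScanRevA st.1.reverse, st.2.1, decide (st.2.2 > 0))) (ls.foldl pvStepA (bs, cur, n)) := by
  induction ls with
  | nil => intro bs cur n; rfl
  | cons l ls ih =>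
    intro bs cur n
    simp only [List.foldl_cons]
    show ls.foldl pvStepB (pvStepB (pvScanRevA bs.reverse, cur, decide (n > 0)) l) = _
    have hstep : pvStepB (pvScanRevA bs.reverse, cur, decide (n > 0)) l
        = (fun st : List String × List String × Nat =>
            (pvScanRevA st.1.reverse, st.2.1, decide (st.2.2 > 0))) (pvStepA (bs, cur, n) l) := by
      simp only [pvStepA, pvStepB]
      by_cases h1 : PySem.Str.strip l = "{"
      · by_cases hc : cur ≠ []
        · simp [h1, hc, pvScanRevA_cons]
        · simp [h1, hc]
      · by_cases h2 : PySem.Str.strip l = "}" ∧ n > 0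
        · have hd : decide (n > 0) = true := by simp [h2.2]
          simp [h2.1, h2.2, pvScanRevA_cons]
        · have hb : ¬ (PySem.Str.strip l = "}" ∧ decide (n > 0) = true) := by
            intro ⟨he, hdd⟩; exact h2 ⟨he, by simpa using hdd⟩
          by_cases h3 : n > 0
          · have h4 : PySem.Str.strip l ≠ "}" := fun he => h2 ⟨he, h3⟩
            simp [h1, h4, h3]
          · simp [h1, h3]
    rw [hstep]
    exact ih _ _ _
-- ===== VERDICT (by name: the statement is the Claim_ definition above) =====
theorem extract_latest_plan_py_spec : Claim_equal_extract_latest_plan_py := by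
  intro history _
  unfold Spec_extract_latest_plan_py extract_latest_plan_py extract_latest_plan_py_alt
  by_cases h : PySem.Str.strip history = ""
  · simp [h]
  · simp only [if_neg h]
    have := pvLoop_inv ((PySem.Str.split? history "\n").getD []) [] [] 0
    simp only [List.reverse_nil] at this
    rw [show pvScanRevA [] = "No plan found in history" from rfl] at this
    rw [show decide (0 > 0) = false from rfl] at this
    rw [this]
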